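-- pv_equiv track=rewrite | github.com/jmeier1963/omegawiki-insilico-socialscience | tools/research_wiki.py | _find_section_heading
-- ===== SOURCE A (Python) =====
-- def _find_section_heading(content: str, heading: str) -> int:
--     """Locate an exact markdown heading in `content`.
--
--     Returns the offset of the leading newline of the matched heading line, or
--     -1 if not found. The match must be exact: the character following
--     `heading` has to be `\\n`, `\\r`, or end-of-string. This rejects prefix
--     collisions like `## Seminal works (extended)` matching `## Seminal works`,
--     which would otherwise let the caller insert text inside another heading.
--     """
--     needle = f"\n{heading}"
--     start = 0
--     while True:
--         idx = content.find(needle, start)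
--         if idx == -1:
--             return -1
--         end_of_match = idx + len(needle)
--         if end_of_match == len(content) or content[end_of_match] in "\n\r":
--             return idx
--         start = idx + 1
-- ===== SOURCE B (Python) =====
-- def _find_section_heading(content: str, heading: str) -> int:
--     """Single left-to-right scan over candidate offsets: at each position i
--     compare the slice against the needle and check the boundary inline,
--     instead of A's find()-with-restart loop."""
--     needle = "\n" + heading
--     n = len(content)
--     m = len(needle)
--     for i in range(n - m + 1):
--         if content[i:i + m] == needle and (i + m == n or content[i + m] in "\n\r"):
--             return i
--     return -1
-- ===== Notes on version B (the rewrite author's own statement) =====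
-- stated objective: simpler
-- what changed: Replaced the find()-with-restart-after-boundary-failure while-loop by one plain scan over all candidate offsets that checks the slice match and the boundary inline.
import Mathlib
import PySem

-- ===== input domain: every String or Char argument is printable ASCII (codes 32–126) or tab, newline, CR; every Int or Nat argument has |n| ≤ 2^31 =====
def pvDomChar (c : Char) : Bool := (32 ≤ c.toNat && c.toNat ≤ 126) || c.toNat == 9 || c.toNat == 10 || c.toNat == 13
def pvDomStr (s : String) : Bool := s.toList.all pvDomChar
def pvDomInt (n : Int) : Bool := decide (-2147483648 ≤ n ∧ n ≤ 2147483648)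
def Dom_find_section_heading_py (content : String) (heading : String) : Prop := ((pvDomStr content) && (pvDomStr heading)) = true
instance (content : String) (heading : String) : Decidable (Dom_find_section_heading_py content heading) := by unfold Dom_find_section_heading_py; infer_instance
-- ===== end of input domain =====

-- B replaces A's find()-with-restart while-loop by one plain scan over candidate
-- offsets checking slice match and boundary inline (objective: simpler).

-- ===== PORT A =====
-- A's `while True` loop; `fuel` only makes the same computation total (each
-- iteration strictly increases `start`, so `len(content)+1` steps suffice).
def pvLoopA (content needle : List Char) : Nat → Nat → Int
  | 0, _ => -1
  | fuel + 1, start =>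
    let idx := PySem.Chars.findFrom content needle (start : Int)
    if idx = -1 then -1
    else
      let e := idx.toNat + needle.length
      if e = content.length then idx
      else if PySem.List.pyGet? content (e : Int) = some '\n' ∨
              PySem.List.pyGet? content (e : Int) = some '\r' then idx
      else pvLoopA content needle fuel (idx.toNat + 1)

def find_section_heading_py (content : String) (heading : String) : Int :=
  pvLoopA content.toList ('\n' :: heading.toList) (content.toList.length + 1) 0

-- ===== PORT B =====
-- B's `for i in range(n - m + 1)` loop; `content[e] in "\n\r"` is ported as the
-- one-character read being '\n' or '\r' (exact for a single index into the 2-char string).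
def pvScanB (content needle : List Char) (i : Nat) : Int :=
  if _h : i < content.length + 1 - needle.length then
    if PySem.List.slice content (some (i : Int)) (some ((i : Int) + (needle.length : Int))) = needle ∧
       (i + needle.length = content.length ∨
        PySem.List.pyGet? content ((i : Int) + (needle.length : Int)) = some '\n' ∨
        PySem.List.pyGet? content ((i : Int) + (needle.length : Int)) = some '\r') then (i : Int)
    else pvScanB content needle (i + 1)
  else -1
termination_by content.length + 1 - i
decreasing_by omega

def find_section_heading_py_alt (content : String) (heading : String) : Int :=
  pvScanB content.toList ('\n' :: heading.toList) 0

-- ===== PRECONDITION & SPEC =====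
def Spec_find_section_heading_py (content : String) (heading : String) (out : Int) : Prop := out = find_section_heading_py_alt content heading
instance (content : String) (heading : String) (out : Int) : Decidable (Spec_find_section_heading_py content heading out) := by unfold Spec_find_section_heading_py; infer_instance

-- ===== CLAIM (what is proved, stated in full; the proofs are below) =====
def Claim_equal_find_section_heading_py : Prop := ∀ (content : String) (heading : String), Dom_find_section_heading_py content heading → Spec_find_section_heading_py content heading (find_section_heading_py content heading)

-- ===== LEMMAS AND PROOFS =====

-- B's slice test at offset i is exactly "needle is a prefix of content.drop i".
lemma pvSlice_eq_iff (content needle : List Char) (i : Nat) :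
    PySem.List.slice content (some (i : Int)) (some ((i : Int) + (needle.length : Int))) = needle ↔
      needle <+: content.drop i := by
  rw [PySem.List.slice_natCast_add, List.prefix_iff_eq_take]
  constructor <;> (intro h; exact h.symm)

-- If needle is not a prefix at offset i, B's scan skips i.
lemma pvScanB_skip (content needle : List Char) (i : Nat)
    (h : ¬ needle <+: content.drop i) :
    pvScanB content needle i = pvScanB content needle (i + 1) := by
  rw [pvScanB]
  split
  case isTrue h2 =>
    rw [if_neg]
    intro ⟨h1, _⟩
    exact h ((pvSlice_eq_iff content needle i).mp h1)
  case isFalse h2 =>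
    rw [pvScanB, dif_neg (by omega)]

-- B's scan from i equals its scan from k when needle is a prefix nowhere in [i, k).
lemma pvScanB_advance (content needle : List Char) (i k : Nat) (hik : i ≤ k)
    (h : ∀ j, i ≤ j → j < k → ¬ needle <+: content.drop j) :
    pvScanB content needle i = pvScanB content needle k := by
  induction k with
  | zero => have : i = 0 := by omega
            rw [this]
  | succ k ih =>
    rcases Nat.lt_or_ge i (k + 1) with hlt | hge
    · rcases Nat.lt_or_ge i k with hik' | hge'
      · rw [ih (by omega) (fun j hj hjk => h j hj (by omega)),
            pvScanB_skip content needle k (h k (by omega) (by omega))]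
      · have : i = k := by omega
        subst this
        exact pvScanB_skip content needle i (h i le_rfl (by omega))
    · have : i = k + 1 := by omega
      rw [this]

-- If needle is a prefix nowhere at or after i, B's scan returns -1.
lemma pvScanB_none (content needle : List Char) (i : Nat)
    (h : ∀ j, i ≤ j → ¬ needle <+: content.drop j) :
    pvScanB content needle i = -1 := by
  rcases Nat.lt_or_ge i (content.length + 1 - needle.length) with hlt | hge
  · rw [pvScanB_advance content needle i (content.length + 1 - needle.length) (by omega)
        (fun j hj _ => h j hj)]
    rw [pvScanB, dif_neg (by omega)]
  · rw [pvScanB, dif_neg (by omega)]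

-- The main loop equivalence: A's restart loop from `start` computes B's scan from `start`.
lemma pvLoopA_eq_scanB (content needle : List Char) (hne : needle ≠ []) :
    ∀ fuel start, start ≤ content.length → content.length + 1 - start ≤ fuel →
      pvLoopA content needle fuel start = pvScanB content needle start := by
  intro fuel
  induction fuel with
  | zero => intro start h1 h2; omega
  | succ fuel ih =>
    intro start h1 h2
    rw [pvLoopA]
    by_cases hidx : PySem.Chars.findFrom content needle (start : Int) = -1
    · rw [if_pos hidx]
      have hno : ¬ needle <:+: content.drop start :=
        (PySem.Chars.findFrom_natCast_eq_neg_one_iff content needle start h1).mp hidx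
      refine (pvScanB_none content needle start (fun j hj hpre => hno ?_)).symm
      have : content.drop j = (content.drop start).drop (j - start) := by
        rw [List.drop_drop]; congr 1; omega
      rw [this] at hpre
      exact (List.infix_iff_prefix_suffix.mpr ⟨_, hpre, (List.drop_suffix _ _)⟩)
    · rw [if_neg hidx]
      obtain ⟨hle, hpre, hfirst⟩ :=
        PySem.Chars.findFrom_natCast_spec content needle start h1 hidx
      set idx := PySem.Chars.findFrom content needle (start : Int) with hidxdef
      have hidx0 : 0 ≤ idx := le_trans (by exact_mod_cast Nat.zero_le start) hle
      have hcast : (idx.toNat : Int) = idx := Int.toNat_of_nonneg hidx0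
      have hstartle : start ≤ idx.toNat := by omega
      have hmle : idx.toNat + needle.length ≤ content.length := by
        have := hpre.length_le
        rw [List.length_drop] at this
        have hlt : idx.toNat ≤ content.length := by
          by_contra hgt
          rw [Nat.sub_eq_zero_of_le (by omega)] at this
          exact hne (List.eq_nil_of_length_eq_zero (by omega))
        omega
      have hadv : pvScanB content needle start = pvScanB content needle idx.toNat :=
        pvScanB_advance content needle start idx.toNat hstartle
          (fun j hj hjk => hfirst j hj hjk)
      have hlen : 0 < needle.length := List.length_pos_iff.mpr hne
      have hin : idx.toNat < content.length + 1 - needle.length := by omega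
      have hslice : PySem.List.slice content (some (idx.toNat : Int))
          (some ((idx.toNat : Int) + (needle.length : Int))) = needle :=
        (pvSlice_eq_iff content needle idx.toNat).mpr hpre
      have hcast2 : ((idx.toNat + needle.length : Nat) : Int)
          = (idx.toNat : Int) + (needle.length : Int) := by push_cast; ring
      rw [hadv]
      show (if idx.toNat + needle.length = content.length then idx
            else if PySem.List.pyGet? content ((idx.toNat + needle.length : Nat) : Int) = some '\n' ∨
                    PySem.List.pyGet? content ((idx.toNat + needle.length : Nat) : Int) = some '\r' then idx
            else pvLoopA content needle fuel (idx.toNat + 1)) = pvScanB content needle idx.toNat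
      rw [hcast2, pvScanB, dif_pos hin]
      by_cases hA1 : idx.toNat + needle.length = content.length
      · -- A: end-of-string boundary
        rw [if_pos hA1]
        split
        next _h => exact hcast.symm
        next hC => exact absurd ⟨hslice, Or.inl hA1⟩ hC
      · rw [if_neg hA1]
        by_cases hA2 : PySem.List.pyGet? content ((idx.toNat : Int) + (needle.length : Int)) = some '\n' ∨
            PySem.List.pyGet? content ((idx.toNat : Int) + (needle.length : Int)) = some '\r'
        · -- A: newline/CR boundary
          rw [if_pos hA2]
          split
          next _h => exact hcast.symm
          next hC => exact absurd ⟨hslice, Or.inr hA2⟩ hC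
        · -- A: boundary fails, restart at idx+1
          rw [if_neg hA2]
          split
          next hC =>
            rcases hC.2 with hc | hc
            · exact absurd hc hA1
            · exact absurd hc hA2
          next hC =>
            exact ih (idx.toNat + 1) (by omega) (by omega)

-- ===== VERDICT (by name: the statement is the Claim_ definition above) =====
theorem find_section_heading_py_spec : Claim_equal_find_section_heading_py := by
  intro content heading _
  show find_section_heading_py content heading = find_section_heading_py_alt content heading
  unfold find_section_heading_py find_section_heading_py_alt
  exact pvLoopA_eq_scanB content.toList ('\n' :: heading.toList) (by simp)
    (content.toList.length + 1) 0 (by omega) (by omega)
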